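-- pv_equiv track=rewrite | github.com/Nishi-Taiga/schedule_automation | app.py | resolve_office_teacher
-- ===== SOURCE A (Python) =====
-- def resolve_office_teacher(day, candidates, day_data):
--     """教室業務担当を優先順位リストから決定する。
--     - day_data（その週・その曜日の出勤講師データ）で出勤確認
--     - 誰も出勤していなければ None（教室業務なし）
--     """
--     if isinstance(candidates, str):
--         candidates = [candidates]
--     for candidate in candidates:
--         # day_data: {ts: [teacher, ...]} — いずれかの時間帯に出勤していれば可
--         for ts, teachers in day_data.items():
--             if candidate in teachers:
--                 return candidate
--     return None
-- ===== SOURCE B (Python) =====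
-- def resolve_office_teacher(day, candidates, day_data):
--     """Flip the traversal: index each candidate by its first (priority) position,
--     then scan every teacher present in any slot once, keeping the smallest
--     priority index seen; return that candidate, or None."""
--     if isinstance(candidates, str):
--         candidates = [candidates]
--     priority = {}
--     for i, c in enumerate(candidates):
--         if c not in priority:
--             priority[c] = i
--     best = None
--     for ts, teachers in day_data.items():
--         for t in teachers:
--             i = priority.get(t)
--             if i is not None and (best is None or i < best):
--                 best = i
--     return candidates[best] if best is not None else None
-- ===== Notes on version B (the rewrite author's own statement) =====
-- stated objective: alternative
-- what changed: Instead of scanning candidates in priority order and testing membership in every slot, B builds a first-index priority table over candidates once, then makes a single pass over all teachers in the slots tracking the minimal priority index, and returns that candidate (or None).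
import Mathlib
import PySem

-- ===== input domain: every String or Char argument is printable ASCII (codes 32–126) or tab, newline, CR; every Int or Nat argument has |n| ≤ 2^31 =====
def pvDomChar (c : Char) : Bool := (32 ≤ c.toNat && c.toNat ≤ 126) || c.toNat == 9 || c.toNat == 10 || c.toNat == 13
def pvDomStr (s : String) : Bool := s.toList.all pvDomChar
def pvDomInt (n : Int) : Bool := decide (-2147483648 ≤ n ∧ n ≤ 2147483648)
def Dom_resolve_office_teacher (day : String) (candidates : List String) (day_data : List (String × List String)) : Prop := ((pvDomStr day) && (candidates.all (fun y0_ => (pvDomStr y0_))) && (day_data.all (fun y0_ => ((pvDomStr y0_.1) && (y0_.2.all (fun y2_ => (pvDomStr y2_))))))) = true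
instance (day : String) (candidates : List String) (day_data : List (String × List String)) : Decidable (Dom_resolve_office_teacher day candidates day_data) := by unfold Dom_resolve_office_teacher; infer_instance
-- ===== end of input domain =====

-- B replaces A's priority-ordered candidate scan with a first-index priority table and a single pass over all present teachers tracking the minimal index (alternative decomposition).


-- ===== PORT A =====
-- inner loop: 'for ts, teachers in day_data.items(): if candidate in teachers: return candidate'
def pvAFound (c : String) : List (String × List String) → Bool
  | [] => false
  | (_, teachers) :: rest => if teachers.contains c then true else pvAFound c rest

-- outer loop over candidates (the 'isinstance(candidates, str)' branch is dead under
-- the type convention: candidates is always a list here)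
def pvALoop (day_data : List (String × List String)) : List String → Option String
  | [] => none
  | c :: rest => if pvAFound c day_data then some c else pvALoop day_data rest

def resolve_office_teacher (day : String) (candidates : List String) (day_data : List (String × List String)) : Option String :=
  pvALoop day_data candidates

-- ===== PORT B =====
-- 'if c not in priority: priority[c] = i' (keep the FIRST index of a duplicate)
def pvPrioIns (d : PySem.Dict String Int) (p : Int × String) : PySem.Dict String Int :=
  if d.contains p.2 then d else d.insert p.2 p.1

-- body of the inner 'for t in teachers' loop: i = priority.get(t); update best
def pvBStep (priority : PySem.Dict String Int) (b : Option Int) (t : String) : Option Int :=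
  match priority.get? t with
  | none => b
  | some i =>
    match b with
    | none => some i
    | some bb => if i < bb then some i else some bb

def resolve_office_teacher_alt (day : String) (candidates : List String) (day_data : List (String × List String)) : Option String :=
  let priority : PySem.Dict String Int :=
    (PySem.List.enumerate candidates 0).foldl pvPrioIns PySem.Dict.empty
  let best : Option Int := day_data.foldl (fun b p => p.2.foldl (pvBStep priority) b) none
  -- 'candidates[best]': best is a valid index whenever it is set, so pyGet? is exact here
  match best with
  | none => none
  | some i => PySem.List.pyGet? candidates i

-- ===== PRECONDITION & SPEC =====
def Spec_resolve_office_teacher (day : String) (candidates : List String) (day_data : List (String × List String)) (out : Option String) : Prop := out = resolve_office_teacher_alt day candidates day_data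
instance (day : String) (candidates : List String) (day_data : List (String × List String)) (out : Option String) : Decidable (Spec_resolve_office_teacher day candidates day_data out) := by unfold Spec_resolve_office_teacher; infer_instance

-- ===== CLAIM (what is proved, stated in full; the proofs are below) =====
def Claim_equal_resolve_office_teacher : Prop := ∀ (day : String) (candidates : List String) (day_data : List (String × List String)), Dom_resolve_office_teacher day candidates day_data → Spec_resolve_office_teacher day candidates day_data (resolve_office_teacher day candidates day_data)

-- ===== LEMMAS AND PROOFS =====

-- combine-minimum used to characterise B's accumulator
def pvOmin (b : Option Nat) (i : Nat) : Option Nat :=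
  match b with
  | none => some i
  | some bb => if i < bb then some i else some bb

-- find over the flattened teacher list, characterising A
def pvFindT (T : List String) : List String → Option String
  | [] => none
  | c :: cs => if T.contains c then some c else pvFindT T cs

lemma pvAFound_eq (c : String) (dd : List (String × List String)) :
    pvAFound c dd = (dd.flatMap (·.2)).contains c := by
  induction dd with
  | nil => simp [pvAFound]
  | cons p rest ih =>
    cases p with
    | mk ts teachers =>
      by_cases h : c ∈ teachers
      · simp [pvAFound, h, List.mem_append]
      · simp [pvAFound, h, ih, List.mem_append]

lemma pvALoop_eq (dd : List (String × List String)) (cands : List String) :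
    pvALoop dd cands = pvFindT (dd.flatMap (·.2)) cands := by
  induction cands with
  | nil => rfl
  | cons c cs ih =>
    simp only [pvALoop, pvFindT, pvAFound_eq, ih]

-- the priority dict maps each string to its first index in cands (as Int, offset k)
lemma pvPrio_get? (t : String) : ∀ (cs : List String) (k : Int) (d : PySem.Dict String Int),
    ((PySem.List.enumerate cs k).foldl pvPrioIns d).get? t
      = if d.contains t then d.get? t
        else (PySem.List.index? cs t).map (fun n : Nat => (n : Int) + k) := by
  intro cs
  induction cs with
  | nil =>
    intro k d
    by_cases h : d.contains t
    · simp [PySem.List.enumerate_nil, h]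
    · have h' : d.contains t = false := by simpa using h
      simp [PySem.List.enumerate_nil, h',
        (PySem.Dict.get?_eq_none_iff_contains d t).mpr h', PySem.List.index?_eq_idxOf?]
  | cons c cs ih =>
    intro k d
    rw [PySem.List.enumerate_cons, List.foldl_cons]
    by_cases htc : t = c
    · subst htc
      rw [ih]
      by_cases hd : d.contains t
      · simp [pvPrioIns, hd]
      · have hd' : d.contains t = false := by simpa using hd
        simp [pvPrioIns, hd', PySem.Dict.contains_insert_self,
          PySem.Dict.get?_insert_self, PySem.List.index?_cons_self t cs,
          ← PySem.List.index?_eq_idxOf?]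
    · have hne : c ≠ t := fun he => htc he.symm
      rw [ih, PySem.List.index?_cons_of_ne cs hne]
      by_cases hd : d.contains c
      · simp only [pvPrioIns, hd, if_true]
        by_cases hdt : d.contains t
        · simp [hdt]
        · have hdt' : d.contains t = false := by simpa using hdt
          rw [if_neg (by simp [hdt']), if_neg (by simp [hdt']), Option.map_map]
          cases PySem.List.index? cs t with
          | none => rfl
          | some n => simp; push_cast; ring
      · have hd' : d.contains c = false := by simpa using hd
        simp only [pvPrioIns, hd', Bool.false_eq_true, if_false]
        have hct : (PySem.Dict.insert d c k).contains t = d.contains t := by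
          rw [PySem.Dict.contains_insert]
          have hb : (t == c) = false := by simpa using fun he => htc he
          simp [hb]
        have hgt : (PySem.Dict.insert d c k).get? t = d.get? t :=
          PySem.Dict.get?_insert_of_ne d k (fun he => htc he)
        rw [hct, hgt]
        by_cases hdt : d.contains t
        · simp [hdt]
        · have hdt' : d.contains t = false := by simpa using hdt
          rw [if_neg (by simp [hdt']), if_neg (by simp [hdt']), Option.map_map]
          cases PySem.List.index? cs t with
          | none => rfl
          | some n => simp; push_cast; ring

lemma pvPrio_get?_zero (cands : List String) (t : String) :
    ((PySem.List.enumerate cands 0).foldl pvPrioIns PySem.Dict.empty).get? t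
      = (PySem.List.index? cands t).map (fun n : Nat => (n : Int)) := by
  rw [pvPrio_get? t cands 0 PySem.Dict.empty]
  rw [if_neg (by simp [PySem.Dict.contains_empty])]
  cases PySem.List.index? cands t <;> simp

lemma pvOmin_cast (b : Option Nat) (i : Nat) :
    (match (b.map (fun n : Nat => (n : Int))) with
      | none => some (i : Int)
      | some bb => if (i : Int) < bb then some (i : Int) else some bb)
      = (pvOmin b i).map (fun n : Nat => (n : Int)) := by
  cases b with
  | none => rfl
  | some bb => by_cases h : i < bb <;> simp [pvOmin, h]

lemma pvB_fold_flat (priority : PySem.Dict String Int) (dd : List (String × List String)) (b : Option Int) :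
    dd.foldl (fun b p => p.2.foldl (pvBStep priority) b) b
      = (dd.flatMap (·.2)).foldl (pvBStep priority) b := by
  induction dd generalizing b with
  | nil => rfl
  | cons p rest ih => simp [List.flatMap_cons, List.foldl_append, ih]

lemma pvB_fold_filterMap (cands : List String) (T : List String) (b : Option Nat) :
    T.foldl (pvBStep ((PySem.List.enumerate cands 0).foldl pvPrioIns PySem.Dict.empty))
        (b.map (fun n : Nat => (n : Int)))
      = ((T.filterMap (PySem.List.index? cands)).foldl pvOmin b).map (fun n : Nat => (n : Int)) := by
  induction T generalizing b with
  | nil => rfl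
  | cons t ts ih =>
    rw [List.foldl_cons, List.filterMap_cons]
    cases h : PySem.List.index? cands t with
    | none =>
      have hs : pvBStep ((PySem.List.enumerate cands 0).foldl pvPrioIns PySem.Dict.empty)
          (b.map (fun n : Nat => (n : Int))) t = b.map (fun n : Nat => (n : Int)) := by
        rw [pvBStep, pvPrio_get?_zero, h]; simp
      rw [hs, ih]
    | some i =>
      have hs : pvBStep ((PySem.List.enumerate cands 0).foldl pvPrioIns PySem.Dict.empty)
          (b.map (fun n : Nat => (n : Int))) t
            = (pvOmin b i).map (fun n : Nat => (n : Int)) := by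
        rw [pvBStep, pvPrio_get?_zero, h]
        simpa using pvOmin_cast b i
      rw [hs, List.foldl_cons, ih]

lemma pvOmin_zero (b : Option Nat) : pvOmin b 0 = some 0 := by
  cases b with
  | none => rfl
  | some bb => cases bb <;> simp [pvOmin]

lemma pv_foldl_omin_some_zero (l : List Nat) : l.foldl pvOmin (some 0) = some 0 := by
  induction l with
  | nil => rfl
  | cons i l ih => simp [pvOmin, ih]

lemma pv_foldl_omin_zero_mem (l : List Nat) (b : Option Nat) (h : 0 ∈ l) :
    l.foldl pvOmin b = some 0 := by
  induction l generalizing b with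
  | nil => simp at h
  | cons i l ih =>
    rcases List.mem_cons.mp h with h0 | h0
    · subst h0; rw [List.foldl_cons, pvOmin_zero, pv_foldl_omin_some_zero]
    · exact ih _ h0

lemma pvOmin_succ (b : Option Nat) (i : Nat) :
    pvOmin (b.map (· + 1)) (i + 1) = (pvOmin b i).map (· + 1) := by
  cases b with
  | none => rfl
  | some bb =>
    by_cases h : i < bb <;> simp [pvOmin, h]

lemma pv_foldl_omin_shift (l : List Nat) (b : Option Nat) :
    (l.map (· + 1)).foldl pvOmin (b.map (· + 1)) = (l.foldl pvOmin b).map (· + 1) := by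
  induction l generalizing b with
  | nil => rfl
  | cons i l ih => simp only [List.map_cons, List.foldl_cons, pvOmin_succ, ih]

lemma pv_filterMap_index_cons_of_not_mem (c : String) (cs : List String) (T : List String)
    (h : c ∉ T) :
    T.filterMap (PySem.List.index? (c :: cs))
      = (T.filterMap (PySem.List.index? cs)).map (· + 1) := by
  induction T with
  | nil => rfl
  | cons t ts ih =>
    have hne : c ≠ t := fun he => h (he ▸ List.mem_cons_self ..)
    have hrec := ih (fun hm => h (List.mem_cons_of_mem _ hm))
    cases hidx : PySem.List.index? cs t with
    | none =>
      rw [List.filterMap_cons, PySem.List.index?_cons_of_ne cs hne, hidx,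
        List.filterMap_cons, hidx]
      exact hrec
    | some i =>
      rw [List.filterMap_cons, PySem.List.index?_cons_of_ne cs hne, hidx,
        List.filterMap_cons, hidx]
      simpa using hrec

lemma pv_zero_mem_idxs (c : String) (cs : List String) (T : List String) (h : c ∈ T) :
    0 ∈ T.filterMap (PySem.List.index? (c :: cs)) := by
  refine List.mem_filterMap.mpr ⟨c, h, ?_⟩
  exact PySem.List.index?_cons_self c cs

-- core: B's minimal-index result, read back through the candidate list, is A's find
lemma pv_core (cands T : List String) :
    (match (T.filterMap (PySem.List.index? cands)).foldl pvOmin none with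
      | none => none
      | some i => cands[i]?) = pvFindT T cands := by
  induction cands generalizing T with
  | nil =>
    have hnil : T.filterMap (PySem.List.index? ([] : List String)) = [] := by
      induction T with
      | nil => rfl
      | cons t ts ih =>
        rw [List.filterMap_cons, (PySem.List.index?_eq_none_iff [] t).mpr (by simp)]
        exact ih
    rw [hnil]
    induction T with
    | nil => rfl
    | cons t ts ih => simpa [pvFindT] using ih
  | cons c cs ih =>
    by_cases h : c ∈ T
    · rw [pv_foldl_omin_zero_mem _ _ (pv_zero_mem_idxs c cs T h)]
      simp [pvFindT, h]
    · rw [pv_filterMap_index_cons_of_not_mem c cs T h]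
      have hsh := pv_foldl_omin_shift (T.filterMap (PySem.List.index? cs)) none
      simp only [Option.map_none] at hsh
      rw [hsh]
      have ih' := ih T
      cases hfold : (T.filterMap (PySem.List.index? cs)).foldl pvOmin none with
      | none => rw [hfold] at ih'; simpa [pvFindT, h] using ih'
      | some i => rw [hfold] at ih'; simpa [pvFindT, h] using ih' 

-- ===== VERDICT (by name: the statement is the Claim_ definition above) =====
theorem resolve_office_teacher_spec : Claim_equal_resolve_office_teacher := by
  intro day cands dd _
  unfold Spec_resolve_office_teacher resolve_office_teacher resolve_office_teacher_alt
  rw [pvALoop_eq, ← pv_core cands (dd.flatMap (·.2))]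
  simp only [pvB_fold_flat]
  have hmap := pvB_fold_filterMap cands (dd.flatMap (·.2)) none
  simp only [Option.map_none] at hmap
  rw [hmap]
  cases hfold : ((dd.flatMap (·.2)).filterMap (PySem.List.index? cands)).foldl pvOmin none with
  | none => rfl
  | some i => simp
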